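-- pv_equiv track=rewrite | github.com/talkenson/smarthome | RSA.py | dec_to_text
-- ===== SOURCE A (Python) =====
-- def dec_to_text(value):
--     binn = ''
--     value = bin(value)
--     for i in range(0, 8 - (len(value) - 2) % 8):
--         binn += '0'
--     for i in range(2, len(value)):
--         binn += value[i]
--     str = ''
--     for i in range(0, len(binn), 8):
--         pstr = ''
--         for j in range(i, i + 8):
--             pstr += binn[j]
--         str += chr(int(pstr,2))
--     return str
-- ===== SOURCE B (Python) =====
-- def dec_to_text(value):
--     n = len(bin(value)) - 2
--     return value.to_bytes(n // 8 + 1, 'big').decode('latin-1')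
-- ===== Notes on version B (the rewrite author's own statement) =====
-- stated objective: idiomatic
-- what changed: Replaces the manual bit-string building and per-byte int() parsing loops with a single big-endian to_bytes conversion whose byte length is computed from len(bin(value)) so the leading zero-padding byte matches A's.
-- outside the precondition, e.g. on dec_to_text(-32): A returns ' ', B raises OverflowError; on dec_to_text(-1): A raises ValueError, B raises OverflowError
import Mathlib
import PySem

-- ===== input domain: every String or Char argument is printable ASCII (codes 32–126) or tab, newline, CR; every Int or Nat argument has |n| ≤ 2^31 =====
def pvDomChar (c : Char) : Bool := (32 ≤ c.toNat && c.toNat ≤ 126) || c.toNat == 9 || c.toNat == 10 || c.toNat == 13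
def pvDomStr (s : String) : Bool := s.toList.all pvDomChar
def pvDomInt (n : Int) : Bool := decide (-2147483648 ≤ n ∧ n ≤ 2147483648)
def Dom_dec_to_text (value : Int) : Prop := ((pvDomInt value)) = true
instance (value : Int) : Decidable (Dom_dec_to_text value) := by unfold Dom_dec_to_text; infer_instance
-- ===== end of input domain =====

-- B replaces A's manual bit-string building and per-byte int(...,2) parsing with a
-- direct big-endian bytes conversion of length n//8+1 (idiomatic; return value only).

-- ===== PORT A =====
def dec_to_text (value : Int) : String :=
  -- value = bin(value)
  let value' : List Char := (PySem.Int.pyBin value).toList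
  -- binn = '' ; for i in range(0, 8 - (len(value) - 2) % 8): binn += '0'
  let binn : List Char :=
    (PySem.List.pyRange 0 (8 - PySem.Int.mod (PySem.List.len value' - 2) 8) 1).foldl
      (fun acc _ => acc ++ ['0']) []
  -- for i in range(2, len(value)): binn += value[i]
  let binn : List Char :=
    (PySem.List.pyRange 2 (PySem.List.len value') 1).foldl
      (fun acc i => acc ++ [PySem.List.pyGetD value' i ' ']) binn
  -- str = '' ; for i in range(0, len(binn), 8): …
  let s : List Char :=
    (PySem.List.pyRange 0 (PySem.List.len binn) 8).foldl
      (fun acc i =>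
        -- pstr = '' ; for j in range(i, i + 8): pstr += binn[j]
        let pstr : List Char :=
          (PySem.List.pyRange i (i + 8) 1).foldl
            (fun p j => p ++ [PySem.List.pyGetD binn j ' ']) []
        -- str += chr(int(pstr, 2))
        acc ++ [Char.ofNat ((PySem.Int.ofCharsBase? pstr 2).getD 0).toNat]) []
  String.ofList s

-- ===== PORT B =====
-- value.to_bytes(length, 'big').decode('latin-1'): big-endian bytes built back to front,
-- each byte decoded with chr (latin-1 is chr on 0..255)
def pyToBytesChars : Nat → Int → List Char → List Char
  | 0, _, acc => acc
  | k + 1, v, acc =>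
      pyToBytesChars k (PySem.Int.floordiv v 256) (Char.ofNat (PySem.Int.mod v 256).toNat :: acc)

def dec_to_text_alt (value : Int) : String :=
  let n : Int := PySem.Str.len (PySem.Int.pyBin value) - 2
  String.ofList (pyToBytesChars (PySem.Int.floordiv n 8 + 1).toNat value [])

-- ===== PRECONDITION & SPEC =====
-- Pre_ excludes negative values, on which B's to_bytes raises OverflowError while A raises
-- ValueError except on the accidental corner where slicing off the minus sign leaves a
-- '0b'-prefixed first chunk that int() happens to accept, so A returns the chr-decoded
-- bytes of the absolute value.
def Pre_dec_to_text (value : Int) : Prop := 0 ≤ value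
instance (value : Int) : Decidable (Pre_dec_to_text value) := by unfold Pre_dec_to_text; infer_instance
def pvWitness_dec_to_text : Int := 5

def Spec_dec_to_text (value : Int) (out : String) : Prop := out = dec_to_text_alt value
instance (value : Int) (out : String) : Decidable (Spec_dec_to_text value out) := by unfold Spec_dec_to_text; infer_instance

-- ===== CLAIM (what is proved, stated in full; the proofs are below) =====
def Claim_equal_dec_to_text : Prop :=
  ∀ (value : Int), Dom_dec_to_text value → Pre_dec_to_text value → Spec_dec_to_text value (dec_to_text value)

-- ===== LEMMAS AND PROOFS =====

def bitVal (c : Char) : Nat := if c = '1' then 1 else 0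

def bitsVal (l : List Char) : Nat := l.foldl (fun a c => 2 * a + bitVal c) 0

def isBit (c : Char) : Prop := c = '0' ∨ c = '1'

theorem bitsVal_foldl (l : List Char) : ∀ (a : Nat),
    l.foldl (fun a c => 2 * a + bitVal c) a = a * 2 ^ l.length + bitsVal l := by
  induction l with
  | nil => intro a; simp [bitsVal]
  | cons c t ih =>
    intro a
    simp only [List.foldl_cons, List.length_cons, bitsVal] at *
    rw [ih (2 * a + bitVal c), ih (2 * 0 + bitVal c)]
    ring

theorem bitsVal_append (xs ys : List Char) :
    bitsVal (xs ++ ys) = bitsVal xs * 2 ^ ys.length + bitsVal ys := by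
  unfold bitsVal
  rw [List.foldl_append, bitsVal_foldl]
  rfl

theorem bitsVal_cons (c : Char) (t : List Char) :
    bitsVal (c :: t) = bitVal c * 2 ^ t.length + bitsVal t := by
  show t.foldl (fun a c => 2 * a + bitVal c) (2 * 0 + bitVal c) = _
  rw [bitsVal_foldl]
  ring

theorem bitsVal_lt (l : List Char) : bitsVal l < 2 ^ l.length := by
  induction l with
  | nil => simp [bitsVal]
  | cons c t ih =>
    rw [bitsVal_cons]
    have hb : bitVal c ≤ 1 := by unfold bitVal; split <;> omega
    have h1 := Nat.one_le_two_pow (n := t.length)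
    simp only [List.length_cons, pow_succ]
    nlinarith

theorem bitsVal_replicate_zero (k : Nat) : bitsVal (List.replicate k '0') = 0 := by
  induction k with
  | zero => simp [bitsVal]
  | succ k ih =>
    unfold bitsVal at *
    simp [List.replicate_succ, List.foldl_cons, bitVal]
    simpa [bitVal] using ih

theorem toDigits_bits (v : Nat) :
    (∀ c ∈ Nat.toDigits 2 v, isBit c) ∧ bitsVal (Nat.toDigits 2 v) = v := by
  induction v using Nat.strong_induction_on with
  | _ v ih =>
    rw [Nat.toDigits_eq_if (by norm_num)]
    by_cases h : v < 2
    · simp only [if_pos h]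
      interval_cases v <;>
        refine ⟨fun c hc => ?_, by simp [bitsVal, bitVal, Nat.digitChar]⟩ <;>
        simp [Nat.digitChar] at hc <;> simp [hc, isBit]
    · simp only [if_neg h]
      obtain ⟨ihb, ihv⟩ := ih (v / 2) (by omega)
      have hdig : isBit ((v % 2).digitChar) ∧ bitVal ((v % 2).digitChar) = v % 2 := by
        have : v % 2 = 0 ∨ v % 2 = 1 := by omega
        rcases this with h2 | h2 <;> rw [h2] <;> exact ⟨by simp [isBit, Nat.digitChar], by simp [bitVal, Nat.digitChar]⟩
      constructor
      · intro c hc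
        rcases List.mem_append.mp hc with hc | hc
        · exact ihb c hc
        · simp only [List.mem_singleton] at hc; rw [hc]; exact hdig.1
      · rw [bitsVal_append, ihv]
        have : bitsVal [(v % 2).digitChar] = v % 2 := by
          unfold bitsVal; simp [hdig.2]
        rw [this]
        simp only [List.length_singleton, pow_one]
        omega

def bitChar (b : Bool) : Char := if b then '1' else '0'

theorem parse8b : ∀ b1 b2 b3 b4 b5 b6 b7 b8 : Bool,
    PySem.Int.ofCharsBase?
        [bitChar b1, bitChar b2, bitChar b3, bitChar b4, bitChar b5, bitChar b6, bitChar b7, bitChar b8] 2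
      = some ((bitsVal [bitChar b1, bitChar b2, bitChar b3, bitChar b4, bitChar b5, bitChar b6, bitChar b7, bitChar b8] : Nat) : Int) := by
  decide

theorem isBit_eq_bitChar {c : Char} (h : isBit c) : c = bitChar (c = '1') := by
  rcases h with rfl | rfl <;> decide

theorem parse8 (c1 c2 c3 c4 c5 c6 c7 c8 : Char)
    (h1 : isBit c1) (h2 : isBit c2) (h3 : isBit c3) (h4 : isBit c4)
    (h5 : isBit c5) (h6 : isBit c6) (h7 : isBit c7) (h8 : isBit c8) :
    PySem.Int.ofCharsBase? [c1, c2, c3, c4, c5, c6, c7, c8] 2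
      = some ((bitsVal [c1, c2, c3, c4, c5, c6, c7, c8] : Nat) : Int) := by
  rw [isBit_eq_bitChar h1, isBit_eq_bitChar h2, isBit_eq_bitChar h3, isBit_eq_bitChar h4,
    isBit_eq_bitChar h5, isBit_eq_bitChar h6, isBit_eq_bitChar h7, isBit_eq_bitChar h8]
  exact parse8b _ _ _ _ _ _ _ _

theorem parse8' (l : List Char) (hb : ∀ c ∈ l, isBit c) (hl : l.length = 8) :
    PySem.Int.ofCharsBase? l 2 = some ((bitsVal l : Nat) : Int) := by
  match l, hl with
  | [c1, c2, c3, c4, c5, c6, c7, c8], _ =>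
    exact parse8 c1 c2 c3 c4 c5 c6 c7 c8 (hb _ (by simp)) (hb _ (by simp)) (hb _ (by simp))
      (hb _ (by simp)) (hb _ (by simp)) (hb _ (by simp)) (hb _ (by simp)) (hb _ (by simp))

theorem range_map_getD {α : Type} (xs : List α) (d : α) (j m : Nat) (h : j + m ≤ xs.length) :
    (List.range m).map (fun t => xs.getD (j + t) d) = (xs.drop j).take m := by
  apply List.ext_getElem
  · simp; omega
  · intro i h1 h2
    simp only [List.getElem_map, List.getElem_range, List.getElem_take, List.getElem_drop]
    have hi : i < m := by simpa using h1
    rw [List.getD_eq_getElem xs d (by omega)]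

theorem const_fold (l : List Int) (acc : List Char) :
    l.foldl (fun acc _ => acc ++ ['0']) acc = acc ++ List.replicate l.length '0' := by
  induction l generalizing acc with
  | nil => simp
  | cons x t ih =>
    simp only [List.foldl_cons, List.length_cons]
    rw [ih, List.append_assoc]
    simp [List.replicate_succ]

theorem bytes_of_bits (L : Nat) : ∀ (bits acc : List Char),
    (∀ c ∈ bits, isBit c) → bits.length = 8 * L →
    pyToBytesChars L ((bitsVal bits : Nat) : Int) acc
      = (List.range L).map (fun k => Char.ofNat (bitsVal ((bits.drop (8 * k)).take 8))) ++ acc := by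
  induction L with
  | zero => intro bits acc _ _; simp [pyToBytesChars]
  | succ L ih =>
    intro bits acc hb hl
    have hinit_len : (bits.take (8 * L)).length = 8 * L := by
      rw [List.length_take, hl]; omega
    have hlast_len : (bits.drop (8 * L)).length = 8 := by
      rw [List.length_drop, hl]; omega
    have hsplit : bits.take (8 * L) ++ bits.drop (8 * L) = bits := List.take_append_drop _ _
    have hV : bitsVal bits = bitsVal (bits.take (8 * L)) * 256 + bitsVal (bits.drop (8 * L)) := by
      conv_lhs => rw [← hsplit]
      rw [bitsVal_append, hlast_len]
      norm_num
    have hlast_lt : bitsVal (bits.drop (8 * L)) < 256 := by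
      have := bitsVal_lt (bits.drop (8 * L))
      rwa [hlast_len] at this
    have h256 : (256 : Int) = ((256 : Nat) : Int) := by norm_num
    show pyToBytesChars L (PySem.Int.floordiv _ 256)
        (Char.ofNat (PySem.Int.mod ((bitsVal bits : Nat) : Int) 256).toNat :: acc) = _
    rw [h256, PySem.Int.floordiv_natCast, PySem.Int.mod_natCast]
    have hdiv : bitsVal bits / 256 = bitsVal (bits.take (8 * L)) := by omega
    have hmod : bitsVal bits % 256 = bitsVal (bits.drop (8 * L)) := by omega
    rw [hdiv, hmod, Int.toNat_natCast]
    rw [ih (bits.take (8 * L)) _ (fun c hc => hb c (List.mem_of_mem_take hc)) hinit_len]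
    rw [List.range_succ, List.map_append, List.append_assoc]
    congr 1
    · apply List.map_congr_left
      intro k hk
      have hk' : k < L := List.mem_range.mp hk
      rw [List.drop_take, List.take_take, min_eq_left (by omega)]
    · simp only [List.map_singleton, List.singleton_append]
      congr 2
      rw [List.take_of_length_le (by rw [hlast_len])]

theorem dec_agree (v : Nat) : dec_to_text (v : Int) = dec_to_text_alt (v : Int) := by
  obtain ⟨hdsb, hdsv⟩ := toDigits_bits v
  have hbin : (PySem.Int.pyBin (v : Int)).toList = '0' :: 'b' :: Nat.toDigits 2 v := by
    rw [PySem.Int.toList_pyBin]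
    unfold PySem.Int.toBinChars0b
    rw [if_neg (by omega)]
    simp
  have hn1 : 1 ≤ (Nat.toDigits 2 v).length := Nat.length_toDigits_pos
  set ds := Nat.toDigits 2 v with hds
  set n := ds.length with hn
  set pad := 8 - n % 8 with hpad
  set L := n / 8 + 1 with hL
  have hlen8 : pad + n = 8 * L := by omega
  have hbinn_len : (List.replicate pad '0' ++ ds).length = 8 * L := by
    simp [← hn]; omega
  have hbinn_bits : ∀ c ∈ List.replicate pad '0' ++ ds, isBit c := by
    intro c hc
    rcases List.mem_append.mp hc with hc | hc
    · exact Or.inl (List.eq_of_mem_replicate hc)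
    · exact hdsb c hc
  have hbinn_val : bitsVal (List.replicate pad '0' ++ ds) = v := by
    rw [bitsVal_append, bitsVal_replicate_zero, hdsv]
    simp
  have h8 : (8 : Int) = ((8 : Nat) : Int) := by norm_num
  have hB : dec_to_text_alt (v : Int) = String.ofList
      ((List.range L).map (fun k =>
        Char.ofNat (bitsVal (((List.replicate pad '0' ++ ds).drop (8 * k)).take 8)))) := by
    simp only [dec_to_text_alt]
    have e1 : PySem.Str.len (PySem.Int.pyBin (v : Int)) - 2 = ((n : Nat) : Int) := by
      simp [PySem.Str.len, hbin, ← hn]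
      omega
    rw [e1, h8, PySem.Int.floordiv_natCast]
    have e3 : ((n / 8 : Nat) : Int) + 1 = ((L : Nat) : Int) := by omega
    rw [e3, Int.toNat_natCast]
    rw [show ((v : Int)) = ((bitsVal (List.replicate pad '0' ++ ds) : Nat) : Int) by
      rw [hbinn_val]]
    rw [bytes_of_bits L _ [] hbinn_bits hbinn_len, List.append_nil]
  have hA : dec_to_text (v : Int) = String.ofList
      ((List.range L).map (fun k =>
        Char.ofNat (bitsVal (((List.replicate pad '0' ++ ds).drop (8 * k)).take 8)))) := by
    simp only [dec_to_text]
    rw [hbin]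
    -- loop 1: the '0' padding
    have ebound : 8 - PySem.Int.mod (PySem.List.len ('0' :: 'b' :: ds) - 2) 8
        = ((pad : Nat) : Int) := by
      have e0 : PySem.List.len ('0' :: 'b' :: ds) - 2 = ((n : Nat) : Int) := by
        simp [PySem.List.len, ← hn]
        omega
      rw [e0, h8, PySem.Int.mod_natCast]
      omega
    rw [ebound, const_fold, PySem.List.length_pyRange_one]
    have epad : ((((pad : Nat) : Int) - 0).toNat) = pad := by omega
    rw [epad, List.nil_append]
    -- loop 2: copying the binary digits
    have hdrop := PySem.List.map_pyGetD_pyRange ('0' :: 'b' :: ds) ' '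
      (a := 2) (by norm_num)
    have elen2 : PySem.List.len ('0' :: 'b' :: ds) = ((2 + n : Nat) : Int) := by
      simp [PySem.List.len, ← hn]
      omega
    rw [elen2] at hdrop
    rw [PySem.List.foldl_append_singleton_eq_map
      (fun i => PySem.List.pyGetD ('0' :: 'b' :: ds) i ' '), elen2, hdrop]
    have edrop : List.drop ((2 : Int).toNat) ('0' :: 'b' :: ds) = ds := rfl
    rw [edrop]
    -- loop 3: the byte chunks
    have elen3 : PySem.List.len (List.replicate pad '0' ++ ds) = ((8 * L : Nat) : Int) := by
      simp [PySem.List.len, ← hn]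
      omega
    rw [elen3]
    rw [PySem.List.foldl_append_singleton_eq_map
      (l := PySem.List.pyRange 0 ((8 * L : Nat) : Int) 8), List.nil_append]
    rw [PySem.List.pyRange_of_pos 0 ((8 * L : Nat) : Int) (by norm_num : (0 : Int) < 8)]
    rw [if_pos (by push_cast; omega : (0 : Int) < ((8 * L : Nat) : Int))]
    have ecount : ((((8 * L : Nat) : Int) - 0 + 8 - 1) / 8).toNat = L := by
      push_cast
      omega
    rw [ecount, List.map_map]
    congr 1
    apply List.map_congr_left
    intro k hk
    have hk' : k < L := List.mem_range.mp hk
    simp only [Function.comp_apply]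
    have hi : (0 : Int) + 8 * (k : Int) = ((8 * k : Nat) : Int) := by push_cast; ring
    rw [hi]
    rw [PySem.List.foldl_append_singleton_eq_map
      (fun j => PySem.List.pyGetD (List.replicate pad '0' ++ ds) j ' '), List.nil_append]
    rw [PySem.List.pyRange_one]
    have e8 : ((((8 * k : Nat) : Int) + 8 - ((8 * k : Nat) : Int)).toNat) = 8 := by
      push_cast
      omega
    rw [e8, List.map_map]
    have emap : List.map
        ((fun j => PySem.List.pyGetD (List.replicate pad '0' ++ ds) j ' ') ∘
          (fun t : Nat => ((8 * k : Nat) : Int) + (t : Int))) (List.range 8)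
        = List.map
            (fun t : Nat => (List.replicate pad '0' ++ ds).getD (8 * k + t) ' ')
            (List.range 8) := by
      apply List.map_congr_left
      intro t ht
      simp only [Function.comp_apply]
      have : ((8 * k : Nat) : Int) + (t : Int) = ((8 * k + t : Nat) : Int) := by
        push_cast
        ring
      rw [this, PySem.List.pyGetD_natCast]
    rw [emap, range_map_getD _ ' ' (8 * k) 8 (by rw [hbinn_len]; omega)]
    rw [parse8' _
      (fun c hc => hbinn_bits c (List.mem_of_mem_drop (List.mem_of_mem_take hc)))
      (by simp [← hn]; omega)]
    simp only [Option.getD_some, Int.toNat_natCast]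
  rw [hA, hB]

-- ===== VERDICT (by name: the statement is the Claim_ definition above) =====
theorem dec_to_text_spec : Claim_equal_dec_to_text := by
  intro value _ hpre
  unfold Spec_dec_to_text
  lift value to ℕ using hpre with v
  exact dec_agree v
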